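-- pv_equiv track=rewrite | github.com/Gubanov-Alex/hillal_cuorse-python | dz11.2_generate_cube_numbers.py | generate_cube_numbers
-- ===== SOURCE A (Python) =====
-- def generate_cube_numbers(end:int)->list:
--     """
--          Generator function cube_numbers_generator, which is a generator of cube's numbers.
--          The upper limit of value this range is
--          determined by the parameter of this function.
--          :param end: Number value of the end of the range.
--          :type end: int.
--          :return: List of cube's numbers.
--          :rtype: list.
--          """
--     # if end < 8:
--     #     return                                 # Checking start the generator for values less than 8.
--     # for x in range(2,end):
--     #          cube = x ** 3
--     #          if cube <= end:
--     #             yield cube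
--     #          else:
--     #             return
--
--     if end < 8:                            # Checking  start the generator for values less than 8.
--         return
--     x = 2
--     while True:
--         cube = x ** 3
--         if cube <= end:
--            yield cube
--         else:
--             return
--         x += 1
-- ===== SOURCE B (Python) =====
-- def generate_cube_numbers(end: int) -> list:
--     # Exponential-search + binary-search for the largest m with m**3 <= end,
--     # then yield the cubes 2**3 .. m**3 directly.
--     if end < 8:
--         return
--     hi = 2
--     while hi ** 3 <= end:
--         hi *= 2
--     lo = 2
--     while lo + 1 < hi:
--         mid = (lo + hi) // 2
--         if mid ** 3 <= end:
--             lo = mid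
--         else:
--             hi = mid
--     for x in range(2, lo + 1):
--         yield x ** 3
-- ===== Notes on version B (the rewrite author's own statement) =====
-- stated objective: alternative
-- what changed: A probes x=2,3,4,... testing each cube against end; B finds the largest m with m**3 <= end by exponential doubling plus binary search and then yields the cubes of range(2, m+1) directly.
import Mathlib
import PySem

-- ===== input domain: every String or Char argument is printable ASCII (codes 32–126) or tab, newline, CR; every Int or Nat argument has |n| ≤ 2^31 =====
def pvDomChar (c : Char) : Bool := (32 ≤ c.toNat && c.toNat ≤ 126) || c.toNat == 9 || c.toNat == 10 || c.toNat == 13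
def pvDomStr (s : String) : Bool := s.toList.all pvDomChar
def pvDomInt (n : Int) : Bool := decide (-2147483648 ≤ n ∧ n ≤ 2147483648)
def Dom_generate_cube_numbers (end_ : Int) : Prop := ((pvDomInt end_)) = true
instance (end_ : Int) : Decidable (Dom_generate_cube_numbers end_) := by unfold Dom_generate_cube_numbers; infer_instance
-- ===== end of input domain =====

-- B replaces A's linear cube-by-cube while-loop by an exponential+binary search
-- for the largest m with m^3 <= end, then emits the cubes over range(2, m+1)
-- (alternative decomposition; same output cost).


-- ===== PORT A =====
-- A's 'while True' loop: x from 2 upward, yield x^3 while x^3 ≤ end_.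
-- fuel is only a totality guard; end_.toNat steps are proved sufficient below.
def cubeLoopA (end_ : Int) (fuel : Nat) (x : Int) : List Int :=
  match fuel with
  | 0 => []
  | fuel + 1 => if x ^ 3 ≤ end_ then x ^ 3 :: cubeLoopA end_ fuel (x + 1) else []

def generate_cube_numbers (end_ : Int) : List Int :=
  if end_ < 8 then [] else cubeLoopA end_ end_.toNat 2

-- ===== PORT B =====
-- 'while hi ** 3 <= end: hi *= 2'  (fuel is a totality guard; 64 doublings
-- are proved sufficient on the stated domain |end_| ≤ 2^31)
def findHiB (end_ : Int) (fuel : Nat) (hi : Int) : Int :=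
  match fuel with
  | 0 => hi
  | fuel + 1 => if hi ^ 3 ≤ end_ then findHiB end_ fuel (hi * 2) else hi

-- 'while lo + 1 < hi: mid = (lo + hi) // 2; …'  (fuel guard, 70 halvings suffice)
def bsearchB (end_ : Int) (fuel : Nat) (lo hi : Int) : Int :=
  match fuel with
  | 0 => lo
  | fuel + 1 =>
    if lo + 1 < hi then
      if (PySem.Int.floordiv (lo + hi) 2) ^ 3 ≤ end_ then
        bsearchB end_ fuel (PySem.Int.floordiv (lo + hi) 2) hi
      else
        bsearchB end_ fuel lo (PySem.Int.floordiv (lo + hi) 2)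
    else lo

def generate_cube_numbers_alt (end_ : Int) : List Int :=
  if end_ < 8 then []
  else
    (PySem.List.pyRange 2 (bsearchB end_ 70 2 (findHiB end_ 64 2) + 1) 1).map
      (fun x => x ^ 3)

-- ===== PRECONDITION & SPEC =====
def Spec_generate_cube_numbers (end_ : Int) (out : List Int) : Prop := out = generate_cube_numbers_alt end_
instance (end_ : Int) (out : List Int) : Decidable (Spec_generate_cube_numbers end_ out) := by unfold Spec_generate_cube_numbers; infer_instance

-- ===== CLAIM (what is proved, stated in full; the proofs are below) =====
def Claim_equal_generate_cube_numbers : Prop := ∀ (end_ : Int), Dom_generate_cube_numbers end_ → Spec_generate_cube_numbers end_ (generate_cube_numbers end_)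

-- ===== LEMMAS AND PROOFS =====

-- cube is strictly monotone on nonnegatives
theorem cube_lt_of_lt (a b : Int) (ha : 0 ≤ a) (hab : a < b) : a ^ 3 < b ^ 3 := by
  have hb : 0 < b := lt_of_le_of_lt ha hab
  have hq : 0 < b ^ 2 + a * b + a ^ 2 := by nlinarith [sq_nonneg a, mul_nonneg ha hb.le]
  have key : 0 < (b - a) * (b ^ 2 + a * b + a ^ 2) := mul_pos (by omega) hq
  nlinarith [key]

theorem findHiB_ge (end_ : Int) : ∀ (fuel : Nat) (hi : Int), 2 ≤ hi →
    hi ≤ findHiB end_ fuel hi := by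
  intro fuel
  induction fuel with
  | zero => intro hi h; simp [findHiB]
  | succ fuel ih =>
      intro hi h
      rw [findHiB]
      split
      · have := ih (hi * 2) (by omega); omega
      · omega

theorem findHiB_le (end_ : Int) : ∀ (fuel : Nat) (hi : Int), 0 ≤ hi →
    findHiB end_ fuel hi ≤ hi * 2 ^ fuel := by
  intro fuel
  induction fuel with
  | zero => intro hi h; simp [findHiB]
  | succ fuel ih =>
      intro hi h
      rw [findHiB]
      have hp : (2:Int) ^ (fuel + 1) = 2 ^ fuel * 2 := by rw [pow_succ]
      split
      · have := ih (hi * 2) (by omega)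
        nlinarith [this]
      · have h1 : (0:Int) < 2 ^ (fuel + 1) := pow_pos (by norm_num) _
        nlinarith [h1]

theorem findHiB_cube_gt (end_ : Int) : ∀ (fuel : Nat) (hi : Int), 2 ≤ hi →
    end_ < (hi * 2 ^ fuel) ^ 3 → end_ < (findHiB end_ fuel hi) ^ 3 := by
  intro fuel
  induction fuel with
  | zero => intro hi h hb; simpa [findHiB] using hb
  | succ fuel ih =>
      intro hi h hb
      rw [findHiB]
      split
      · exact ih (hi * 2) (by omega) (by
          have : hi * 2 * 2 ^ fuel = hi * 2 ^ (fuel + 1) := by rw [pow_succ]; ring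
          rw [this]; exact hb)
      · omega

theorem findHiB_64_ge4 (end_ : Int) (h8 : 8 ≤ end_) : 4 ≤ findHiB end_ 64 2 := by
  rw [show (64:Nat) = 63 + 1 from rfl, findHiB]
  have hc : (2:Int) ^ 3 ≤ end_ := by norm_num; omega
  simp only [hc, if_true]
  exact findHiB_ge end_ 63 (2 * 2) (by omega)

theorem bsearchB_spec (end_ : Int) : ∀ (fuel : Nat) (lo hi : Int), 2 ≤ lo → lo < hi →
    lo ^ 3 ≤ end_ → end_ < hi ^ 3 → (hi - lo).toNat ≤ 2 ^ fuel →
    lo ≤ bsearchB end_ fuel lo hi ∧ (bsearchB end_ fuel lo hi) ^ 3 ≤ end_ ∧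
      end_ < (bsearchB end_ fuel lo hi + 1) ^ 3 := by
  intro fuel
  induction fuel with
  | zero =>
      intro lo hi h1 h2 hlo hhi hf
      have : hi = lo + 1 := by simp at hf; omega
      subst this
      exact ⟨le_refl _, by simpa [bsearchB] using hlo, by simpa [bsearchB] using hhi⟩
  | succ fuel ih =>
      intro lo hi h1 h2 hlo hhi hf
      rw [bsearchB]
      by_cases hc : lo + 1 < hi
      · have hmid : PySem.Int.floordiv (lo + hi) 2 = (lo + hi) / 2 :=
          PySem.Int.floordiv_eq_ediv_of_pos (by norm_num)
        have hp : (2:Nat) ^ (fuel + 1) = 2 ^ fuel * 2 := by rw [pow_succ]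
        have hb1 : lo < PySem.Int.floordiv (lo + hi) 2 := by rw [hmid]; omega
        have hb2 : PySem.Int.floordiv (lo + hi) 2 < hi := by rw [hmid]; omega
        simp only [hc, if_true]
        by_cases hcc : (PySem.Int.floordiv (lo + hi) 2) ^ 3 ≤ end_
        · simp only [hcc, if_true]
          have := ih (PySem.Int.floordiv (lo + hi) 2) hi (by omega) hb2 hcc hhi
            (by rw [hmid]; rw [hmid] at hb1 hb2; omega)
          omega
        · simp only [hcc, if_false]
          have := ih lo (PySem.Int.floordiv (lo + hi) 2) h1 hb1 hlo (by omega)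
            (by rw [hmid]; rw [hmid] at hb1 hb2; omega)
          omega
      · simp only [hc, if_false]
        have : hi = lo + 1 := by omega
        subst this
        exact ⟨le_refl _, hlo, hhi⟩

theorem cubeLoopA_eq (end_ m : Int) (hm3 : m ^ 3 ≤ end_) (hm1 : end_ < (m + 1) ^ 3) :
    ∀ (fuel : Nat) (x : Int), 2 ≤ x → x ≤ m + 1 → (m + 1 - x).toNat < fuel →
      cubeLoopA end_ fuel x = (PySem.List.pyRange x (m + 1) 1).map (fun y => y ^ 3) := by
  intro fuel
  induction fuel with
  | zero => intro x hx hxm hf; omega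
  | succ fuel ih =>
      intro x hx hxm hf
      rw [cubeLoopA]
      by_cases hc : x ^ 3 ≤ end_
      · have hxlt : x < m + 1 := by
          rcases lt_or_eq_of_le hxm with h | h
          · exact h
          · subst h; omega
        simp only [hc, if_true]
        rw [PySem.List.pyRange_one_cons hxlt, List.map_cons, ih (x + 1) (by omega) (by omega) (by omega)]
      · have hxge : m + 1 ≤ x := by
          by_contra hcon
          have hxm' : x ≤ m := by omega
          rcases lt_or_eq_of_le hxm' with h | h
          · have := cube_lt_of_lt x m (by omega) h; omega
          · subst h; omega
        simp only [hc, if_false]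
        rw [PySem.List.pyRange_one_eq_nil (by omega), List.map_nil]

-- ===== VERDICT (by name: the statement is the Claim_ definition above) =====
theorem generate_cube_numbers_spec : Claim_equal_generate_cube_numbers := by
  intro end_ hdom
  unfold Spec_generate_cube_numbers generate_cube_numbers generate_cube_numbers_alt
  by_cases h8 : end_ < 8
  · simp [h8]
  · simp only [h8, if_false]
    have hdom' : end_ ≤ 2147483648 := by
      simp [Dom_generate_cube_numbers, pvDomInt] at hdom; omega
    have hhi4 : 4 ≤ findHiB end_ 64 2 := findHiB_64_ge4 end_ (by omega)
    have hhile : findHiB end_ 64 2 ≤ 2 * 2 ^ 64 := findHiB_le end_ 64 2 (by omega)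
    have hcube : end_ < (findHiB end_ 64 2) ^ 3 := by
      apply findHiB_cube_gt end_ 64 2 (by omega)
      have h1 : ((2:Int) * 2 ^ 64) ^ 3 = 50216813883093446110686315385661331328818843555712276103168 := by norm_num
      omega
    have hintv : (findHiB end_ 64 2 - 2).toNat ≤ 2 ^ 70 := by
      have h2 : (2:Int) * 2 ^ 64 = 36893488147419103232 := by norm_num
      have h3 : (2:Nat) ^ 70 = 1180591620717411303424 := by norm_num
      omega
    obtain ⟨hge, hle, hlt⟩ := bsearchB_spec end_ 70 2 (findHiB end_ 64 2)
      (le_refl 2) (by omega) (by norm_num; omega) hcube hintv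
    apply cubeLoopA_eq end_ (bsearchB end_ 70 2 (findHiB end_ 64 2)) hle hlt end_.toNat 2
      (le_refl 2) (by omega)
    · -- fuel sufficiency for A: m < end_ since 2 ≤ m and m^3 ≤ end_
      have hm := hge
      have : bsearchB end_ 70 2 (findHiB end_ 64 2) < end_ := by
        nlinarith [hle, hm]
      omega
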